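-- pv_equiv track=rewrite | github.com/hieudoanm/lodash | packages/py/lodash/array.py | sortedIndex
-- ===== SOURCE A (Python) =====
-- def sortedIndex(array, value):
--   index = -1
--   for idx, _ in enumerate(array):
--     if idx < len(array) - 1:
--       first = array[idx]
--       second = array[idx + 1]
--       if first <= value and value <= second:
--         index = idx + 1
--         break
--     else:
--       idx = index + 1
--   return index
-- ===== SOURCE B (Python) =====
-- def sortedIndex(array, value):
--     n = len(array)
--     if n < 2 or value < array[0] or value > array[n - 1]:
--         return -1
--     lo, hi = 0, n - 1
--     while lo < hi:  # find first j with array[j] >= value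
--         mid = (lo + hi) // 2
--         if array[mid] < value:
--             lo = mid + 1
--         else:
--             hi = mid
--     return max(1, lo)
-- ===== Notes on version B (the rewrite author's own statement) =====
-- stated objective: faster
-- what changed: Replaced A's linear scan over consecutive pairs by a lower-bound binary search with range guards; equality is claimed on Pre_: sorted-ascending arrays (the function's documented domain - it is named sortedIndex) plus the trivially-agreeing inputs (fewer than two elements, or value strictly outside the element range), excluding only the remaining unsorted arrays where A returns the first bracketing adjacent pair.
-- outside the precondition, e.g. on sortedIndex([5, 0, 5], 3): A returns 2, B returns -1
import Mathlib
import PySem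

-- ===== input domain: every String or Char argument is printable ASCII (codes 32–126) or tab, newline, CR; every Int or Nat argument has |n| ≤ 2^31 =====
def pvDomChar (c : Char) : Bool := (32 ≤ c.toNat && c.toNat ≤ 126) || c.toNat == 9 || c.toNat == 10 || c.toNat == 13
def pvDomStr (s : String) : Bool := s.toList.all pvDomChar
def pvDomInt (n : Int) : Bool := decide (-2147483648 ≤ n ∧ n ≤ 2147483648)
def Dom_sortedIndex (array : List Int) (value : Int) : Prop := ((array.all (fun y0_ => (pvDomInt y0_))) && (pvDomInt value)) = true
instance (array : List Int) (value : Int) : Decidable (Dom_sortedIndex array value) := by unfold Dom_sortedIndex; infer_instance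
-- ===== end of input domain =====

-- B replaces A's linear scan of consecutive pairs by a lower-bound binary search,
-- valid on the function's documented domain: arrays sorted ascending (objective: faster, O(log n)).

-- ===== PORT A =====
-- A's for-loop with break: index stays -1 unless a bracketing pair is found; the
-- Python `else` arm only rebinds the loop variable (no effect), so the loop just continues.
def sortedIndexLoopA (array : List Int) (value : Int) (idx : Nat) : Int :=
  if idx < array.length then
    if idx < array.length - 1 then
      if array.getD idx 0 ≤ value ∧ value ≤ array.getD (idx + 1) 0 then (idx : Int) + 1
      else sortedIndexLoopA array value (idx + 1)
    else sortedIndexLoopA array value (idx + 1)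
  else -1
termination_by array.length - idx

def sortedIndex (array : List Int) (value : Int) : Int :=
  sortedIndexLoopA array value 0

-- ===== PORT B =====
-- binary search for the first index j with array[j] >= value (Source B's while loop)
def bsLoop (array : List Int) (value : Int) (lo hi : Nat) : Nat :=
  if lo < hi then
    let mid := (lo + hi) / 2
    if array.getD mid 0 < value then bsLoop array value (mid + 1) hi
    else bsLoop array value lo mid
  else lo
termination_by hi - lo
decreasing_by all_goals omega

def sortedIndex_alt (array : List Int) (value : Int) : Int :=
  let n := array.length
  if n < 2 ∨ value < array.getD 0 0 ∨ array.getD (n - 1) 0 < value then -1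
  else ((max 1 (bsLoop array value 0 (n - 1)) : Nat) : Int)

-- ===== PRECONDITION & SPEC =====
-- Pre_ covers the function's documented domain (it is named sortedIndex): arrays sorted
-- ascending, where the binary search is meaningful; it also admits inputs where both
-- programs trivially return -1 (fewer than two elements, or value strictly outside the
-- element range). Excluded are the remaining unsorted arrays, on which A still returns a
-- value (the first bracketing adjacent pair, e.g. A([5,0,5],3)=2) that a binary search
-- cannot be asked to reproduce.
def Pre_sortedIndex (array : List Int) (value : Int) : Prop :=
  array.length < 2 ∨ List.Pairwise (· ≤ ·) array ∨
  (∀ x ∈ array, value < x) ∨ (∀ x ∈ array, x < value)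

instance (array : List Int) (value : Int) : Decidable (Pre_sortedIndex array value) := by
  unfold Pre_sortedIndex; infer_instance

def pvWitness_sortedIndex : List Int × Int := ([1, 3, 3, 7], 4)

def Spec_sortedIndex (array : List Int) (value : Int) (out : Int) : Prop := out = sortedIndex_alt array value
instance (array : List Int) (value : Int) (out : Int) : Decidable (Spec_sortedIndex array value out) := by unfold Spec_sortedIndex; infer_instance

-- ===== CLAIM (what is proved, stated in full; the proofs are below) =====
def Claim_equal_sortedIndex : Prop := ∀ (array : List Int) (value : Int), Dom_sortedIndex array value → Pre_sortedIndex array value → Spec_sortedIndex array value (sortedIndex array value)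

-- ===== LEMMAS AND PROOFS =====

-- sorted arrays are monotone under getD-indexing
theorem pvMono {array : List Int} (h : List.Pairwise (· ≤ ·) array) {i j : Nat}
    (hij : i ≤ j) (hj : j < array.length) :
    array.getD i 0 ≤ array.getD j 0 := by
  rcases Nat.lt_or_ge i j with hlt | hge
  · have hij' := List.pairwise_iff_getElem.mp h i j (lt_trans hlt hj) hj hlt
    rw [List.getD_eq_getElem _ _ (lt_trans hlt hj), List.getD_eq_getElem _ _ hj]
    exact hij'
  · have : i = j := le_antisymm hij hge
    subst this; exact le_refl _

-- A's loop returns -1 when no remaining adjacent pair brackets the value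
theorem loopA_none (array : List Int) (value : Int) (idx : Nat)
    (h : ∀ k, idx ≤ k → k < array.length - 1 →
      ¬(array.getD k 0 ≤ value ∧ value ≤ array.getD (k + 1) 0)) :
    sortedIndexLoopA array value idx = -1 := by
  fun_induction sortedIndexLoopA array value idx with
  | case1 idx h1 h2 hc =>
      exact absurd hc (h idx le_rfl h2)
  | case2 idx h1 h2 hc ih =>
      exact ih (fun k hk => h k (by omega))
  | case3 idx h1 h2 ih =>
      exact ih (fun k hk => h k (by omega))
  | case4 idx h1 => rfl

-- A's loop returns i+1 when i is the first bracketing index at or after idx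
theorem loopA_found (array : List Int) (value : Int) (idx : Nat) (i : Nat)
    (hle : idx ≤ i) (hi : i < array.length - 1)
    (hc : array.getD i 0 ≤ value ∧ value ≤ array.getD (i + 1) 0)
    (hmin : ∀ k, idx ≤ k → k < i →
      ¬(array.getD k 0 ≤ value ∧ value ≤ array.getD (k + 1) 0)) :
    sortedIndexLoopA array value idx = (i : Int) + 1 := by
  fun_induction sortedIndexLoopA array value idx with
  | case1 idx h1 h2 hcond =>
      have : idx = i := by
        by_contra hne
        exact (hmin idx le_rfl (by omega)) hcond
      simp [this]
  | case2 idx h1 h2 hcond ih =>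
      have hne : idx ≠ i := fun he => hcond (he ▸ hc)
      exact ih (by omega) (fun k hk hki => hmin k (by omega) hki)
  | case3 idx h1 h2 ih =>
      omega
  | case4 idx h1 =>
      omega

-- binary search invariant: result is the least index r with value ≤ array[r]
theorem bsLoop_spec (array : List Int) (value : Int) (lo hi : Nat)
    (hsorted : List.Pairwise (· ≤ ·) array)
    (hlohi : lo ≤ hi) (hhi : hi < array.length)
    (hQhi : value ≤ array.getD hi 0)
    (hlow : ∀ k, k < lo → array.getD k 0 < value) :
    lo ≤ bsLoop array value lo hi ∧ bsLoop array value lo hi ≤ hi ∧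
    value ≤ array.getD (bsLoop array value lo hi) 0 ∧
    (∀ k, k < bsLoop array value lo hi → array.getD k 0 < value) := by
  fun_induction bsLoop array value lo hi with
  | case1 lo hi h1 mid hmid ih =>
      have hmid_lt : mid < hi := by omega
      have hlow' : ∀ k, k < mid + 1 → array.getD k 0 < value := by
        intro k hk
        rcases Nat.lt_or_ge k lo with h | h
        · exact hlow k h
        · calc array.getD k 0 ≤ array.getD mid 0 :=
                pvMono hsorted (by omega) (by omega)
            _ < value := hmid
      have := ih (by omega) hhi hQhi hlow'
      exact ⟨by omega, this.2.1, this.2.2⟩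
  | case2 lo hi h1 mid hmid ih =>
      have hQmid : value ≤ array.getD mid 0 := le_of_not_gt hmid
      have := ih (by omega) (by omega) hQmid hlow
      exact ⟨this.1, by omega, this.2.2⟩
  | case3 lo hi h1 =>
      have : lo = hi := by omega
      exact ⟨le_rfl, by omega, this ▸ hQhi, hlow⟩

-- getD-indexed elements are members of the list
theorem pvGetDMem (array : List Int) (k : Nat) (hk : k < array.length) :
    array.getD k 0 ∈ array := by
  rw [List.getD_eq_getElem _ _ hk]; exact List.getElem_mem hk

-- ===== VERDICT (by name: the statement is the Claim_ definition above) =====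
theorem sortedIndex_spec : Claim_equal_sortedIndex := by
  intro array value _dom hpre
  unfold Spec_sortedIndex sortedIndex sortedIndex_alt
  set n := array.length with hn
  rcases hpre with hshort | hsorted | hlo | hhi
  · rw [if_pos (Or.inl hshort)]
    exact loopA_none array value 0 (fun k _ hk _ => by omega)
  case inr.inr.inl =>
    have hA : sortedIndexLoopA array value 0 = -1 :=
      loopA_none array value 0 (fun k _ hk hc => by
        have := hlo _ (pvGetDMem array k (by omega))
        omega)
    rcases Nat.lt_or_ge n 2 with h2 | h2
    · rw [if_pos (Or.inl h2)]; exact hA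
    · rw [if_pos (Or.inr (Or.inl (hlo _ (pvGetDMem array 0 (by omega)))))]
      exact hA
  case inr.inr.inr =>
    have hA : sortedIndexLoopA array value 0 = -1 :=
      loopA_none array value 0 (fun k _ hk hc => by
        have := hhi _ (pvGetDMem array (k + 1) (by omega))
        omega)
    rcases Nat.lt_or_ge n 2 with h2 | h2
    · rw [if_pos (Or.inl h2)]; exact hA
    · rw [if_pos (Or.inr (Or.inr (hhi _ (pvGetDMem array (n - 1) (by omega)))))]
      exact hA
  by_cases hguard : n < 2 ∨ value < array.getD 0 0 ∨ array.getD (n - 1) 0 < value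
  · rw [if_pos hguard]
    apply loopA_none
    intro k _ hk ⟨hc1, hc2⟩
    rcases hguard with h | h | h
    · omega
    · have : array.getD 0 0 ≤ array.getD k 0 := pvMono hsorted (Nat.zero_le k) (by omega)
      omega
    · have : array.getD (k + 1) 0 ≤ array.getD (n - 1) 0 := pvMono hsorted (by omega) (by omega)
      omega
  · rw [if_neg hguard]
    push Not at hguard
    obtain ⟨hnge, hv0, hvn⟩ := hguard
    have hbs := bsLoop_spec array value 0 (n - 1) hsorted (by omega) (by omega) hvn
      (fun k hk => absurd hk (Nat.not_lt_zero k))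
    set j := bsLoop array value 0 (n - 1) with hj
    obtain ⟨_, hjhi, hQj, hjmin⟩ := hbs
    set i := max 1 j with hi
    have hi1 : 1 ≤ i := le_max_left _ _
    have hin : i ≤ n - 1 := by omega
    have hcond : array.getD (i - 1) 0 ≤ value ∧ value ≤ array.getD ((i - 1) + 1) 0 := by
      have hisucc : (i - 1) + 1 = i := by omega
      rcases Nat.eq_zero_or_pos j with hj0 | hjpos
      · have hi_eq : i = 1 := by omega
        constructor
        · simpa [hi_eq] using hv0
        · rw [hisucc]
          calc value ≤ array.getD j 0 := hQj
            _ ≤ array.getD i 0 := pvMono hsorted (by omega) (by omega)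
      · have hi_eq : i = j := by omega
        constructor
        · have := hjmin (i - 1) (by omega)
          omega
        · rw [hisucc, hi_eq]; exact hQj
    have := loopA_found array value 0 (i - 1) (Nat.zero_le _) (by omega) hcond
      (fun k _ hki ⟨_, hc2⟩ => by
        have hkj : k + 1 < j := by omega
        have := hjmin (k + 1) hkj
        omega)
    rw [this]
    omega
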